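-- pv_equiv track=rewrite | github.com/jblowe/RE | projects/TGTM/hook.py | fuzzy_string
-- ===== SOURCE A (Python) =====
-- def fuzzy_string(mapping, string):
--     length = len(string)
--     old_string = string
--     new_string = []
--     while string != '':
--         (longest_candidate, its_target, its_len) = (None, None, 0)
--         # Partition initials into most specific rules to be
--         # chosen. The longer the initial, the more priority it gets.
--         for (initial, target) in mapping.items():
--             if string.startswith(initial) and len(initial) > its_len:
--                 (longest_candidate, its_target, its_len) = (initial, target, len(initial))
--         if longest_candidate:
--             new_string.append(its_target)
--             string = string[its_len:]
--         else:
--             new_string.append(string[0])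
--             string = string[1:]
--     return ''.join(new_string)
-- ===== SOURCE B (Python) =====
-- def fuzzy_string(mapping, string):
--     # hash-table of rules + probe only the distinct initial lengths, longest first
--     table = {initial: target for initial, target in mapping.items() if initial}
--     lengths = sorted({len(k) for k in table}, reverse=True)
--     out = []
--     while string:
--         for l in lengths:
--             key = string[:l]
--             if key in table:
--                 out.append(table[key])
--                 string = string[len(key):]
--                 break
--         else:
--             out.append(string[0])
--             string = string[1:]
--     return ''.join(out)
-- ===== Notes on version B (the rewrite author's own statement) =====
-- stated objective: faster
-- what changed: Replaces the per-position linear scan over all mapping rules (tracking the longest matching initial with an accumulator) by a hash table of rules probed once per distinct initial length, longest length first.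
import Mathlib
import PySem

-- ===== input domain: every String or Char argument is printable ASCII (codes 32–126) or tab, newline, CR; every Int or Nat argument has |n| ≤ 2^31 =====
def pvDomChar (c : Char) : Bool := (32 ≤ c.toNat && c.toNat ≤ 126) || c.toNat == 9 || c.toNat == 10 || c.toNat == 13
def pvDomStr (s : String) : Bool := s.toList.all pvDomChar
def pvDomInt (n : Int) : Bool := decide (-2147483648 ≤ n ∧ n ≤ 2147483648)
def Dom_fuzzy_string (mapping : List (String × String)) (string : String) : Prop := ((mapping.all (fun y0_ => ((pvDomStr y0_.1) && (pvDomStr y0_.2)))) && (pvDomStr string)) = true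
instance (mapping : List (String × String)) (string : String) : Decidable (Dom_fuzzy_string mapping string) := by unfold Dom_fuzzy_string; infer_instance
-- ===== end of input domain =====

-- B replaces A's per-position scan over every rule by a hash table probed once per
-- distinct initial length (longest first); measured faster. Same return value everywhere.

-- ===== PORT A =====
-- the 'mapping' dict received by the Python function, as char-list items (boundary conversion, shared by both ports)
def pvItems (mapping : List (String × String)) : List (List Char × List Char) :=
  (PySem.Dict.ofList mapping).items.map (fun p => (p.1.toList, p.2.toList))

-- the while loop of A; fuel = length of the string, each iteration consumes ≥ 1 char
def loopA (its : List (List Char × List Char)) : Nat → List Char → List (List Char)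
  | 0, _ => []
  | _ + 1, [] => []                     -- while string != ''
  | fuel + 1, c :: rest =>
      let s := c :: rest
      -- for (initial, target) in mapping.items(): keep the longest matching initial
      let best := its.foldl
        (fun acc it =>
          if PySem.Chars.startswith s it.1 = true ∧ it.1.length > acc.2.2 then
            (some it.1, some it.2, it.1.length)
          else acc)
        ((none : Option (List Char)), (none : Option (List Char)), (0 : Nat))
      if (best.1.getD []).isEmpty = false then     -- `if longest_candidate:` (None and '' falsy)
        best.2.1.getD [] :: loopA its fuel (s.drop best.2.2)   -- string[its_len:] (nonneg index: drop)
      else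
        [c] :: loopA its fuel rest                 -- string[0]; string[1:]

def fuzzy_string (mapping : List (String × String)) (string : String) : String :=
  -- ''.join(new_string) = flatten of the collected pieces
  String.ofList (List.flatten (loopA (pvItems mapping) string.toList.length string.toList))

-- ===== PORT B =====
-- for l in lengths: key = string[:l]; if key in table: → the matched key, if any
def probeB (tb : PySem.Dict (List Char) (List Char)) : List Nat → List Char → Option (List Char)
  | [], _ => none
  | l :: restL, s =>
      let key := s.take l
      if tb.contains key then some key else probeB tb restL s

def loopB (tb : PySem.Dict (List Char) (List Char)) (lens : List Nat) :
    Nat → List Char → List (List Char)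
  | 0, _ => []
  | _ + 1, [] => []                     -- while string
  | fuel + 1, c :: rest =>
      match probeB tb lens (c :: rest) with
      | some key => tb.getD key [] :: loopB tb lens fuel ((c :: rest).drop key.length)
          -- table[key] (key present, checked by `in`); string = string[len(key):]
      | none => [c] :: loopB tb lens fuel rest

def fuzzy_string_alt (mapping : List (String × String)) (string : String) : String :=
  let its := pvItems mapping
  -- table = {initial: target for initial, target in mapping.items() if initial}
  let tb := its.foldl (fun d p => if p.1.isEmpty then d else d.insert p.1 p.2) (PySem.Dict.mk [])
  -- lengths = sorted({len(k) for k in table}, reverse=True)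
  let lens := PySem.List.sorted (PySem.Set.ofList (tb.keys.map List.length)) (fun x => x) true
  String.ofList (List.flatten (loopB tb lens string.toList.length string.toList))

-- ===== PRECONDITION & SPEC =====
def Spec_fuzzy_string (mapping : List (String × String)) (string : String) (out : String) : Prop := out = fuzzy_string_alt mapping string
instance (mapping : List (String × String)) (string : String) (out : String) : Decidable (Spec_fuzzy_string mapping string out) := by unfold Spec_fuzzy_string; infer_instance

-- ===== CLAIM (what is proved, stated in full; the proofs are below) =====
def Claim_equal_fuzzy_string : Prop := ∀ (mapping : List (String × String)) (string : String), Dom_fuzzy_string mapping string → Spec_fuzzy_string mapping string (fuzzy_string mapping string)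

-- ===== LEMMAS AND PROOFS =====

-- the length accumulator of A's inner fold, on its own
def mmStep (s : List Char) (m : Nat) (it : List Char × List Char) : Nat :=
  if PySem.Chars.startswith s it.1 = true ∧ it.1.length > m then it.1.length else m

def maxMatch (s : List Char) (its : List (List Char × List Char)) : Nat :=
  its.foldl (mmStep s) 0

-- every matching initial is bounded by maxMatch
theorem maxMatch_bound (s : List Char) (its : List (List Char × List Char)) :
    ∀ it ∈ its, PySem.Chars.startswith s it.1 = true → it.1.length ≤ maxMatch s its := by
  induction its using List.reverseRecOn with
  | nil => intro it h; simp at h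
  | append_singleton xs x ih =>
    intro it hmem hsw
    have hm : maxMatch s (xs ++ [x]) = mmStep s (maxMatch s xs) x := by
      simp [maxMatch, List.foldl_append]
    rcases List.mem_append.1 hmem with h | h
    · have := ih it h hsw
      have : maxMatch s xs ≤ mmStep s (maxMatch s xs) x := by
        unfold mmStep; split <;> omega
      omega
    · have hx : it = x := by simpa using h
      subst hx
      rw [hm]; unfold mmStep; split
      · omega
      · rename_i hc
        push Not at hc
        exact Nat.le_of_lt_succ (Nat.lt_succ_of_le (hc hsw))

-- A's inner fold, named for the lemmas (syntactically the fold inside loopA)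
def foldA (s : List Char) (its : List (List Char × List Char)) :
    Option (List Char) × Option (List Char) × Nat :=
  its.foldl
    (fun acc it =>
      if PySem.Chars.startswith s it.1 = true ∧ it.1.length > acc.2.2 then
        (some it.1, some it.2, it.1.length)
      else acc)
    ((none : Option (List Char)), (none : Option (List Char)), (0 : Nat))

-- characterisation of A's inner fold
theorem foldA_char (s : List Char) (its : List (List Char × List Char)) :
    (maxMatch s its = 0 → foldA s its = (none, none, 0)) ∧
    (maxMatch s its ≠ 0 →
      maxMatch s its ≤ s.length ∧ ∃ t, (s.take (maxMatch s its), t) ∈ its ∧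
      foldA s its = (some (s.take (maxMatch s its)), some t, maxMatch s its)) := by
  induction its using List.reverseRecOn with
  | nil => exact ⟨fun _ => rfl, fun h => absurd rfl h⟩
  | append_singleton xs x ih =>
    have hm : maxMatch s (xs ++ [x]) = mmStep s (maxMatch s xs) x := by
      simp [maxMatch, List.foldl_append]
    have hsnd : (foldA s xs).2.2 = maxMatch s xs := by
      by_cases h0 : maxMatch s xs = 0
      · rw [ih.1 h0, h0]
      · obtain ⟨-, t, -, he⟩ := ih.2 h0
        rw [he]
    have hfold : foldA s (xs ++ [x]) =
        (if PySem.Chars.startswith s x.1 = true ∧ x.1.length > (foldA s xs).2.2 then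
          (some x.1, some x.2, x.1.length)
        else foldA s xs) := by
      simp [foldA, List.foldl_append]
    by_cases hc : PySem.Chars.startswith s x.1 = true ∧ x.1.length > maxMatch s xs
    · have hpre : x.1 <+: s := (PySem.Chars.startswith_iff s x.1).1 hc.1
      have hLm : maxMatch s (xs ++ [x]) = x.1.length := by
        rw [hm]; unfold mmStep; rw [if_pos hc]
      have hxt : s.take x.1.length = x.1 := (List.prefix_iff_eq_take.1 hpre).symm
      have hff : foldA s (xs ++ [x]) = (some x.1, some x.2, x.1.length) := by
        rw [hfold, if_pos (by rw [hsnd]; exact hc)]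
      constructor
      · intro h0; rw [hLm] at h0; omega
      · intro _
        refine ⟨by rw [hLm]; exact hpre.length_le, x.2, ?_, ?_⟩
        · rw [hLm, hxt]; exact List.mem_append_right _ (by simp)
        · rw [hff, hLm, hxt]
    · have hLm : maxMatch s (xs ++ [x]) = maxMatch s xs := by
        rw [hm]; unfold mmStep; rw [if_neg hc]
      have hff : foldA s (xs ++ [x]) = foldA s xs := by
        rw [hfold, if_neg (by rw [hsnd]; exact hc)]
      rw [hLm, hff]
      refine ⟨ih.1, fun h0 => ?_⟩
      obtain ⟨h1, t, h2, h3⟩ := ih.2 h0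
      exact ⟨h1, t, List.mem_append_left _ h2, h3⟩


-- the dict-comprehension fold appends exactly the nonempty-key pairs (keys fresh throughout)
theorem tb_items (its : List (List Char × List Char)) :
    ∀ (d : PySem.Dict (List Char) (List Char)),
      (d.keys ++ its.map (fun p => p.1)).Nodup →
      (its.foldl (fun d p => if p.1.isEmpty then d else d.insert p.1 p.2) d).items
        = d.items ++ its.filter (fun p => !p.1.isEmpty) := by
  induction its with
  | nil => intro d _; simp
  | cons p rest ih =>
    intro d hnd
    by_cases hp : p.1.isEmpty
    · have hnd' : (d.keys ++ rest.map (fun p => p.1)).Nodup := by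
        refine List.Sublist.nodup ?_ hnd
        exact (List.Sublist.refl d.keys).append ((List.sublist_cons_self _ _).map _)
      simp only [List.foldl_cons, if_pos hp, List.filter_cons]
      have : (!p.1.isEmpty) = false := by simp [hp]
      rw [this]
      exact ih d hnd'
    · have hnotmem : p.1 ∉ d.keys := by
        intro hmem
        have := (List.nodup_append.mp hnd).2.2 p.1 hmem p.1 (by simp)
        exact this rfl
      have hcon : d.contains p.1 = false := by
        by_contra h
        exact hnotmem ((PySem.Dict.contains_iff_mem_keys d p.1).1 (by simpa using h))
      have hkeys : (d.insert p.1 p.2).keys = d.keys ++ [p.1] :=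
        PySem.Dict.keys_insert_of_not_contains d p.2 hcon
      have hitems : (d.insert p.1 p.2).items = d.items ++ [(p.1, p.2)] :=
        PySem.Dict.items_insert_of_not_contains d p.2 hcon
      have hnd' : ((d.insert p.1 p.2).keys ++ rest.map (fun p => p.1)).Nodup := by
        rw [hkeys, List.append_assoc]
        simpa using hnd
      simp only [List.foldl_cons, if_neg hp, List.filter_cons]
      have : (!p.1.isEmpty) = true := by simp [hp]
      rw [this, ih _ hnd', hitems]
      simp

-- a probe list none of whose prefixes is in the table finds nothing
theorem probeB_none (tb : PySem.Dict (List Char) (List Char)) (s : List Char) :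
    ∀ lens : List Nat, (∀ l ∈ lens, tb.contains (s.take l) = false) →
      probeB tb lens s = none := by
  intro lens
  induction lens with
  | nil => intro _; rfl
  | cons l rest ih =>
    intro h
    simp only [probeB, h l (by simp)]
    exact ih (fun l' hl' => h l' (by simp [hl']))

-- probing distinct lengths in descending order finds the longest-match key s.take L
theorem probeB_char (tb : PySem.Dict (List Char) (List Char)) (s : List Char) (L : Nat)
    (h2 : L ≤ s.length)
    (hbound : ∀ k, tb.contains k = true → k <+: s → k.length ≤ L)
    (hconL : tb.contains (s.take L) = true) :
    ∀ lens : List Nat, lens.Pairwise (fun a b => b ≤ a) → L ∈ lens →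
      probeB tb lens s = some (s.take L) := by
  intro lens
  induction lens with
  | nil => intro _ h; simp at h
  | cons l rest ih =>
    intro hpw hmem
    have hlge : L ≤ l := by
      rcases List.mem_cons.mp hmem with h | h
      · omega
      · exact (List.pairwise_cons.mp hpw).1 L h
    by_cases hcon : tb.contains (s.take l) = true
    · have hb : (s.take l).length ≤ L := hbound _ hcon (List.take_prefix l s)
      have hlen : (s.take l).length = min l s.length := List.length_take
      have heq : s.take l = s.take L := by
        rcases Nat.eq_or_lt_of_le hlge with h | h
        · rw [h]
        · have hsl : s.length ≤ L := by omega
          have : L = s.length := le_antisymm h2 hsl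
          rw [List.take_of_length_le (by omega), this, List.take_length]
      simp only [probeB, heq]
      rw [if_pos hconL]
    · have hne : L ≠ l := by
        intro h; rw [h] at hconL; exact hcon hconL
      have hmem' : L ∈ rest := by
        rcases List.mem_cons.mp hmem with h | h
        · exact absurd h hne
        · exact h
      simp only [probeB]
      rw [if_neg (by simpa using hcon)]
      exact ih (List.pairwise_cons.mp hpw).2 hmem'

-- the two while loops agree, step for step
theorem loop_eq (its : List (List Char × List Char))
    (tb : PySem.Dict (List Char) (List Char)) (lens : List Nat)
    (hnd : (its.map (fun p => p.1)).Nodup)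
    (htb : tb.items = its.filter (fun p => !p.1.isEmpty))
    (hlens : lens = PySem.List.sorted (PySem.Set.ofList (tb.keys.map List.length)) (fun x => x) true) :
    ∀ (fuel : Nat) (s : List Char), loopA its fuel s = loopB tb lens fuel s := by
  have hkeys : tb.keys = (its.filter (fun p => !p.1.isEmpty)).map (fun p => p.1) := by
    show tb.items.map _ = _
    rw [htb]
  have hkeysnd : tb.keys.Nodup := by
    rw [hkeys]
    exact List.Sublist.nodup (List.filter_sublist.map _) hnd
  -- a key of the table is a nonempty key of the mapping
  have hkey_mem : ∀ k, tb.contains k = true → k ≠ [] ∧ ∃ v, (k, v) ∈ its := by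
    intro k hc
    have : k ∈ tb.keys := (PySem.Dict.contains_iff_mem_keys tb k).1 hc
    rw [hkeys] at this
    obtain ⟨p, hp, hpk⟩ := List.mem_map.mp this
    have hpf := List.of_mem_filter hp
    refine ⟨by rw [← hpk]; simpa using hpf, p.2, ?_⟩
    rw [← hpk]
    exact List.mem_of_mem_filter hp
  intro fuel
  induction fuel with
  | zero => intro s; rfl
  | succ fuel ih =>
    intro s
    match s with
    | [] => rfl
    | c :: rest =>
      have hchar := foldA_char (c :: rest) its
      by_cases hL : maxMatch (c :: rest) its = 0
      · -- no rule matches: both take the single-character branch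
        have hA : foldA (c :: rest) its = (none, none, 0) := hchar.1 hL
        have hprobe : probeB tb lens (c :: rest) = none := by
          apply probeB_none
          intro l hl
          by_contra h
          have hc : tb.contains ((c :: rest).take l) = true := by simpa using h
          obtain ⟨hne, v, hv⟩ := hkey_mem _ hc
          have hsw : PySem.Chars.startswith (c :: rest) ((c :: rest).take l) = true :=
            (PySem.Chars.startswith_iff _ _).2 (List.take_prefix l _)
          have hb := maxMatch_bound (c :: rest) its ((c :: rest).take l, v) hv hsw
          rw [hL] at hb
          simp only at hb
          exact hne (List.eq_nil_of_length_eq_zero (by omega))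
        show loopA its (fuel + 1) (c :: rest) = loopB tb lens (fuel + 1) (c :: rest)
        simp only [loopA, loopB]
        rw [show (List.foldl _ _ its : Option (List Char) × Option (List Char) × Nat)
              = foldA (c :: rest) its from rfl, hA, hprobe]
        simp [ih rest]
      · -- the longest matching initial is (c :: rest).take L
        obtain ⟨hle, t, hmem, hA⟩ := hchar.2 hL
        set L := maxMatch (c :: rest) its with hLdef
        have htakeL : ((c :: rest).take L).length = L := by
          rw [List.length_take]; omega
        have htne : (c :: rest).take L ≠ [] := by
          intro h
          rw [h] at htakeL
          simp at htakeL; omega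
        have hitem : ((c :: rest).take L, t) ∈ tb.items := by
          rw [htb]
          exact List.mem_filter.mpr ⟨hmem, by simpa using htne⟩
        have hconL : tb.contains ((c :: rest).take L) = true :=
          (PySem.Dict.contains_iff_mem_keys tb _).2 (by
            rw [hkeys]
            exact List.mem_map.mpr ⟨_, List.mem_filter.mpr ⟨hmem, by simpa using htne⟩, rfl⟩)
        have hLmem : L ∈ lens := by
          rw [hlens, PySem.List.mem_sorted, PySem.Set.mem_ofList]
          exact List.mem_map.mpr ⟨(c :: rest).take L,
            (PySem.Dict.contains_iff_mem_keys tb _).1 hconL, htakeL⟩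
        have hpw : lens.Pairwise (fun a b => b ≤ a) := by
          rw [hlens]
          have := PySem.List.sorted_pairwise_rev (PySem.Set.ofList (tb.keys.map List.length)) (fun x => x)
          simpa using this
        have hprobe : probeB tb lens (c :: rest) = some ((c :: rest).take L) := by
          refine probeB_char tb (c :: rest) L hle ?_ hconL lens hpw hLmem
          intro k hc hpre
          obtain ⟨hne, v, hv⟩ := hkey_mem _ hc
          exact maxMatch_bound (c :: rest) its (k, v) hv ((PySem.Chars.startswith_iff _ _).2 hpre)
        have hgetD : tb.getD ((c :: rest).take L) [] = t :=
          PySem.Dict.getD_of_mem_items tb hitem hkeysnd []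
        show loopA its (fuel + 1) (c :: rest) = loopB tb lens (fuel + 1) (c :: rest)
        simp only [loopA, loopB]
        rw [show (List.foldl _ _ its : Option (List Char) × Option (List Char) × Nat)
              = foldA (c :: rest) its from rfl, hA, hprobe]
        simp only [Option.getD_some, htakeL, hgetD]
        rw [if_pos (by simpa using htne)]
        simp [ih]

theorem fuzzy_string_spec : Claim_equal_fuzzy_string := by
  intro mapping string _
  unfold Spec_fuzzy_string fuzzy_string fuzzy_string_alt
  simp only []
  have hnd : ((pvItems mapping).map (fun p => p.1)).Nodup := by
    have h1 : (PySem.Dict.ofList mapping).keys.Nodup := PySem.Dict.nodup_keys_ofList mapping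
    have h2 : (pvItems mapping).map (fun p => p.1)
        = (PySem.Dict.ofList mapping).items.map (fun p => p.1.toList) := by
      simp [pvItems]
    rw [h2]
    have h3 : (PySem.Dict.ofList mapping).items.map (fun p => p.1.toList)
        = (PySem.Dict.ofList mapping).keys.map String.toList := by
      simp [PySem.Dict.keys, List.map_map]
    rw [h3]
    exact h1.map (fun a b h => String.toList_inj.mp h)
  have htb : ((pvItems mapping).foldl
      (fun d p => if p.1.isEmpty then d else d.insert p.1 p.2) (PySem.Dict.mk [])).items
      = (pvItems mapping).filter (fun p => !p.1.isEmpty) := by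
    rw [tb_items (pvItems mapping) (PySem.Dict.mk []) (by simpa using hnd)]
    rfl
  rw [loop_eq (pvItems mapping) _ _ hnd htb rfl]
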